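-- pv_equiv track=rewrite | github.com/dea980/Algorithm_basic | 수조작하기1/solution.py | solution
-- ===== SOURCE A (Python) =====
-- def solution(n, control):
--     n =0
--     for i in control:
--         if i == 'w':
--             n +=1
--         elif i == 's':
--             n-=1
--         elif i == 'd':
--             n +=10
--         elif i =='a':
--             n -=10
--         else:
--             break
--     return n
-- ===== SOURCE B (Python) =====
-- from itertools import takewhile
-- from collections import Counter
--
-- def solution(n, control):
--     prefix = takewhile(lambda c: c in {'w', 's', 'd', 'a'}, control)
--     t = Counter(prefix)
--     return (t['w'] - t['s']) + 10 * (t['d'] - t['a'])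
-- ===== Notes on version B (the rewrite author's own statement) =====
-- stated objective: alternative
-- what changed: Replaces A's per-character running accumulator with a takewhile-isolated valid prefix, a Counter tally of that prefix, and one closed arithmetic combination (w-s)+10*(d-a); the unused parameter n is ignored rather than overwritten.
import Mathlib
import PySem

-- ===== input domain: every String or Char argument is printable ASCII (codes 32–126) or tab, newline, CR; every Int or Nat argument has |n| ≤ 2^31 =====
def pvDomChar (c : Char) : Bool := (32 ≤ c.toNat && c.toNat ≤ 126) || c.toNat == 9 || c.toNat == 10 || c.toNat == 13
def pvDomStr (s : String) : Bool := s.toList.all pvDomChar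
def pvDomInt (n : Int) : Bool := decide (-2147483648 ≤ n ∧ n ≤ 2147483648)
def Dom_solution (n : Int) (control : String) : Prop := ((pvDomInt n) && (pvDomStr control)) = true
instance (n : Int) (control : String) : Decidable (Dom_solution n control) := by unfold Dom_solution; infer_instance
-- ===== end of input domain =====

-- ===== PORT A =====
-- A: per-character loop with running accumulator, break on any other char
def solGo : List Char → Int → Int
  | [], n => n
  | c :: cs, n =>
    if c = 'w' then solGo cs (n + 1)
    else if c = 's' then solGo cs (n - 1)
    else if c = 'd' then solGo cs (n + 10)
    else if c = 'a' then solGo cs (n - 10)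
    else n

def solution (n : Int) (control : String) : Int :=
  solGo control.toList 0

-- ===== PORT B =====
-- B: takeWhile valid prefix, tally counts, closed arithmetic combination; n ignored
def solution_alt (_n : Int) (control : String) : Int :=
  let p := control.toList.takeWhile (fun c => c ∈ ['w', 's', 'd', 'a'])
  ((p.count 'w' : Int) - (p.count 's' : Int)) + 10 * ((p.count 'd' : Int) - (p.count 'a' : Int))

-- ===== PRECONDITION & SPEC =====
def Spec_solution (n : Int) (control : String) (out : Int) : Prop := out = solution_alt n control
instance (n : Int) (control : String) (out : Int) : Decidable (Spec_solution n control out) := by unfold Spec_solution; infer_instance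

-- ===== CLAIM (what is proved, stated in full; the proofs are below) =====
def Claim_equal_solution : Prop := ∀ (n : Int) (control : String), Dom_solution n control → Spec_solution n control (solution n control)

-- ===== LEMMAS AND PROOFS =====

-- ===== VERDICT (by name: the statement is the Claim_ definition above) =====
def altVal (l : List Char) : Int :=
  let p := l.takeWhile (fun c => c ∈ ['w', 's', 'd', 'a'])
  ((p.count 'w' : Int) - (p.count 's' : Int)) + 10 * ((p.count 'd' : Int) - (p.count 'a' : Int))

theorem solGo_eq (l : List Char) : ∀ n : Int, solGo l n = n + altVal l := by
  induction l with
  | nil => intro n; simp [solGo, altVal]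
  | cons c cs ih =>
    intro n
    by_cases hw : c = 'w'
    · simp [solGo, altVal, hw, ih, List.takeWhile, List.count_cons]; ring
    · by_cases hs : c = 's'
      · simp [solGo, altVal, hw, hs, ih, List.takeWhile, List.count_cons]; ring
      · by_cases hd : c = 'd'
        · simp [solGo, altVal, hw, hs, hd, ih, List.takeWhile, List.count_cons]; ring
        · by_cases ha : c = 'a'
          · simp [solGo, altVal, hw, hs, hd, ha, ih, List.takeWhile, List.count_cons]; ring
          · simp [solGo, altVal, hw, hs, hd, ha, List.takeWhile]

theorem solution_spec : Claim_equal_solution := by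
  intro n control _
  unfold Spec_solution solution solution_alt
  simpa [altVal] using solGo_eq control.toList 0
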